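-- pv_equiv track=rewrite | github.com/MLGBJDLW/ouroboros | .ouroboros/scripts/input/commands.py | prepend_instruction
-- ===== SOURCE A (Python) =====
-- from typing import List, Tuple, Optional, Dict
--
-- SLASH_COMMANDS: Dict[str, Dict[str, str]] = {
--     "/ouroboros":           {"desc": "Main Orchestrator", "file": "ouroboros.agent.md"},
--     "/ouroboros-init":      {"desc": "Project Init", "file": "ouroboros-init.agent.md"},
--     "/ouroboros-spec":      {"desc": "Spec Workflow", "file": "ouroboros-spec.agent.md"},
--     "/ouroboros-implement": {"desc": "Implementation", "file": "ouroboros-implement.agent.md"},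
--     "/ouroboros-archive":   {"desc": "Archive Specs", "file": "ouroboros-archive.agent.md"},
-- }
--
-- def prepend_instruction(content: str) -> str:
--     """
--     Prepend an instruction to follow the corresponding agent prompt
--     when content starts with a valid slash command.
--
--     Example:
--         Input:  "/ouroboros-spec create auth feature"
--         Output: "Follow the prompt '.github/agents/ouroboros-spec.agent.md'\\n\\n/ouroboros-spec create auth feature"
--
--     Args:
--         content: The input content that may start with a slash command
--
--     Returns:
--         Content with agent instruction prepended if slash command detected,
--         otherwise returns content unchanged
--     """
--     content_stripped = content.strip()
--
--     # Sort by length descending to match longer commands first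
--     for cmd in sorted(SLASH_COMMANDS.keys(), key=len, reverse=True):
--         if content_stripped.startswith(cmd):
--             # Check that it's a complete command (followed by space, newline, or end)
--             rest = content_stripped[len(cmd):]
--             if not rest or rest[0] in (' ', '\n', '\t'):
--                 info = SLASH_COMMANDS[cmd]
--                 agent_file = info.get("file", "")
--                 if agent_file:
--                     prompt_path = f".github/agents/{agent_file}"
--                     prefix = f"Follow the prompt '{prompt_path}'\n\n"
--                     return prefix + content
--
--     return content
-- ===== SOURCE B (Python) =====
-- from typing import Dict
--
-- SLASH_COMMANDS: Dict[str, Dict[str, str]] = {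
--     "/ouroboros":           {"desc": "Main Orchestrator", "file": "ouroboros.agent.md"},
--     "/ouroboros-init":      {"desc": "Project Init", "file": "ouroboros-init.agent.md"},
--     "/ouroboros-spec":      {"desc": "Spec Workflow", "file": "ouroboros-spec.agent.md"},
--     "/ouroboros-implement": {"desc": "Implementation", "file": "ouroboros-implement.agent.md"},
--     "/ouroboros-archive":   {"desc": "Archive Specs", "file": "ouroboros-archive.agent.md"},
-- }
--
-- def prepend_instruction(content: str) -> str:
--     """Prepend the agent-prompt instruction when content starts with a slash command.
--
--     Instead of scanning every command with startswith, extract the command token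
--     (the stripped content up to the first ' ', '\\n' or '\\t') and do one dict lookup.
--     """
--     stripped = content.strip()
--     token = stripped
--     for i, ch in enumerate(stripped):
--         if ch in (' ', '\n', '\t'):
--             token = stripped[:i]
--             break
--     agent_file = SLASH_COMMANDS.get(token, {}).get("file", "")
--     if agent_file:
--         return f"Follow the prompt '.github/agents/{agent_file}'\n\n" + content
--     return content
-- ===== Notes on version B (the rewrite author's own statement) =====
-- stated objective: simpler
-- what changed: B replaces A's length-sorted loop of startswith/boundary checks over every command with computing the command token (stripped content up to the first ' ', '\n' or '\t') once and doing a single dict lookup.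
import Mathlib
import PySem

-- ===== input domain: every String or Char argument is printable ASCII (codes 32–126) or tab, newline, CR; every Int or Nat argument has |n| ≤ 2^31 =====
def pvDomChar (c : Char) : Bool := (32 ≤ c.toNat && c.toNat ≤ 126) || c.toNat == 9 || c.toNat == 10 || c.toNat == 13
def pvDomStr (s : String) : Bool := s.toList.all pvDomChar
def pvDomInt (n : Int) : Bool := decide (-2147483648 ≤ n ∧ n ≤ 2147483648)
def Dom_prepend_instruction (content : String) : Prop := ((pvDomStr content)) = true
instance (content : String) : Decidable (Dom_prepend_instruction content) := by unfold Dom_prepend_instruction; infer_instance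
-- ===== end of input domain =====

-- B replaces A's length-sorted loop of startswith/boundary checks over every command by computing
-- the command token (stripped content up to the first ' ', '\n' or '\t') once and doing one dict
-- lookup; objective: simpler (same return value everywhere).

-- ===== PORT A =====
-- shared data: the module constant SLASH_COMMANDS (str keys modelled as List Char)
def SLASH_COMMANDS : PySem.Dict (List Char) (PySem.Dict String String) :=
  PySem.Dict.ofList [
    ("/ouroboros".toList,           PySem.Dict.ofList [("desc", "Main Orchestrator"), ("file", "ouroboros.agent.md")]),
    ("/ouroboros-init".toList,      PySem.Dict.ofList [("desc", "Project Init"), ("file", "ouroboros-init.agent.md")]),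
    ("/ouroboros-spec".toList,      PySem.Dict.ofList [("desc", "Spec Workflow"), ("file", "ouroboros-spec.agent.md")]),
    ("/ouroboros-implement".toList, PySem.Dict.ofList [("desc", "Implementation"), ("file", "ouroboros-implement.agent.md")]),
    ("/ouroboros-archive".toList,   PySem.Dict.ofList [("desc", "Archive Specs"), ("file", "ouroboros-archive.agent.md")])]

-- c in (' ', '\n', '\t')
def pvBoundary (c : Char) : Bool := c == ' ' || c == '\n' || c == '\t'

-- Python's "not rest or rest[0] in (' ', '\n', '\t')" (the short-circuit makes rest[0] safe)
def pvRestOk : List Char → Bool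
  | [] => true
  | c :: _ => pvBoundary c

-- A's for-loop over the sorted command list; `none` = the loop fell through
def pvLoopA (content : String) (stripped : List Char) : List (List Char) → Option String
  | [] => none
  | cmd :: more =>
    if PySem.Chars.startswith stripped cmd then
      -- rest = content_stripped[len(cmd):]
      if pvRestOk (PySem.List.slice stripped (some (cmd.length : Int)) none) then
        let info := (SLASH_COMMANDS.get? cmd).getD (PySem.Dict.ofList [])
        let agent_file := info.getD "file" ""
        if agent_file ≠ "" then
          some ("Follow the prompt '" ++ (".github/agents/" ++ agent_file) ++ "'\n\n" ++ content)
        else pvLoopA content stripped more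
      else pvLoopA content stripped more
    else pvLoopA content stripped more

def prepend_instruction (content : String) : String :=
  let stripped := PySem.Chars.strip content.toList
  match pvLoopA content stripped (PySem.List.sorted SLASH_COMMANDS.keys (fun c => c.length) true) with
  | some r => r
  | none => content

-- ===== PORT B =====
-- B's for-loop with break: the prefix of `stripped` up to the first ' ', '\n' or '\t'
def pvToken : List Char → List Char
  | [] => []
  | c :: cs => if pvBoundary c then [] else c :: pvToken cs

def prepend_instruction_alt (content : String) : String :=
  let stripped := PySem.Chars.strip content.toList
  let token := pvToken stripped
  let agent_file := ((SLASH_COMMANDS.get? token).getD (PySem.Dict.ofList [])).getD "file" ""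
  if agent_file ≠ "" then "Follow the prompt '.github/agents/" ++ agent_file ++ "'\n\n" ++ content
  else content

-- ===== PRECONDITION & SPEC =====
def Spec_prepend_instruction (content : String) (out : String) : Prop := out = prepend_instruction_alt content
instance (content : String) (out : String) : Decidable (Spec_prepend_instruction content out) := by unfold Spec_prepend_instruction; infer_instance

-- ===== CLAIM (what is proved, stated in full; the proofs are below) =====
def Claim_equal_prepend_instruction : Prop := ∀ (content : String), Dom_prepend_instruction content → Spec_prepend_instruction content (prepend_instruction content)

-- ===== LEMMAS AND PROOFS =====

-- Python's sorted(SLASH_COMMANDS.keys(), key=len, reverse=True), evaluated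
theorem pvSortedCmds :
    PySem.List.sorted SLASH_COMMANDS.keys (fun c => c.length) true =
      ["/ouroboros-implement".toList, "/ouroboros-archive".toList, "/ouroboros-init".toList,
       "/ouroboros-spec".toList, "/ouroboros".toList] := by decide

-- A's per-command test holds iff the command token of `t` is exactly `cmd`
theorem pvCond_iff (cmd t : List Char) (h : cmd.all (fun c => !pvBoundary c) = true) :
    (PySem.Chars.startswith t cmd = true ∧ pvRestOk (t.drop cmd.length) = true) ↔ pvToken t = cmd := by
  induction cmd generalizing t with
  | nil =>
    cases t with
    | nil => simp [pvToken, pvRestOk, PySem.Chars.startswith_iff]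
    | cons c cs =>
      by_cases hb : pvBoundary c = true <;>
        simp [pvToken, pvRestOk, hb, PySem.Chars.startswith_iff]
  | cons a as ih =>
    simp only [List.all_cons, Bool.and_eq_true, Bool.not_eq_true'] at h
    obtain ⟨ha, has⟩ := h
    cases t with
    | nil => simp [pvToken, PySem.Chars.startswith_iff]
    | cons c cs =>
      have hdrop : List.drop (a :: as).length (c :: cs) = List.drop as.length cs := rfl
      rw [hdrop]
      have hiff := ih cs has
      by_cases hb : pvBoundary c = true
      · constructor
        · rintro ⟨hs, -⟩
          rw [PySem.Chars.startswith_iff, List.cons_prefix_cons] at hs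
          exact absurd (hs.1 ▸ hb) (by simp [ha])
        · intro htok
          simp [pvToken, hb] at htok
      · constructor
        · rintro ⟨hs, hr⟩
          rw [PySem.Chars.startswith_iff, List.cons_prefix_cons] at hs
          have : pvToken cs = as := hiff.mp ⟨by rw [PySem.Chars.startswith_iff]; exact hs.2, hr⟩
          simp [pvToken, hb, hs.1, this]
        · intro htok
          simp [pvToken, hb] at htok
          have := hiff.mpr htok.2
          refine ⟨?_, this.2⟩
          rw [PySem.Chars.startswith_iff, List.cons_prefix_cons]
          exact ⟨htok.1.symm, (PySem.Chars.startswith_iff _ _).mp this.1⟩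

-- a command whose token test fails is skipped by A's loop
theorem pvLoopA_skip (content : String) (t cmd : List Char) (more : List (List Char))
    (hall : cmd.all (fun c => !pvBoundary c) = true) (h : pvToken t ≠ cmd) :
    pvLoopA content t (cmd :: more) = pvLoopA content t more := by
  simp only [pvLoopA, PySem.List.slice_from_natCast]
  by_cases hs : PySem.Chars.startswith t cmd = true
  · have hr : pvRestOk (t.drop cmd.length) ≠ true := fun hr => h ((pvCond_iff cmd t hall).mp ⟨hs, hr⟩)
    simp [hs, hr]
  · simp [hs]

-- a command whose token test succeeds makes A's loop return the prefixed content
theorem pvLoopA_hit (content : String) (t cmd : List Char) (more : List (List Char)) (f : String)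
    (hall : cmd.all (fun c => !pvBoundary c) = true) (h : pvToken t = cmd)
    (hf : ((SLASH_COMMANDS.get? cmd).getD (PySem.Dict.ofList [])).getD "file" "" = f)
    (hne : f ≠ "") :
    pvLoopA content t (cmd :: more)
      = some ("Follow the prompt '" ++ (".github/agents/" ++ f) ++ "'\n\n" ++ content) := by
  obtain ⟨hs, hr⟩ := (pvCond_iff cmd t hall).mpr h
  simp only [pvLoopA, PySem.List.slice_from_natCast]
  simp [hs, hr, hf, hne]

-- B's result, as a function of its token and the looked-up file
theorem pvAlt_eq (content : String) (tok : List Char) (f : String)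
    (h : pvToken (PySem.Chars.strip content.toList) = tok)
    (hf : ((SLASH_COMMANDS.get? tok).getD (PySem.Dict.ofList [])).getD "file" "" = f) :
    prepend_instruction_alt content
      = if f ≠ "" then "Follow the prompt '.github/agents/" ++ f ++ "'\n\n" ++ content
        else content := by
  simp only [prepend_instruction_alt]
  simp only [h, hf]

-- equal literal prefixes give equal results
theorem pvOut_eq (content pre1 pre2 : String) (hpre : pre1 = pre2) :
    pre1 ++ content = pre2 ++ content := by rw [hpre]

-- ===== VERDICT (by name: the statement is the Claim_ definition above) =====
theorem prepend_instruction_spec : Claim_equal_prepend_instruction := by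
  intro content _
  unfold Spec_prepend_instruction prepend_instruction
  simp only [pvSortedCmds]
  set t := PySem.Chars.strip content.toList with ht
  by_cases h1 : pvToken t = "/ouroboros-implement".toList
  · rw [pvLoopA_hit content t _ _ "ouroboros-implement.agent.md" (by decide) h1 (by decide) (by decide),
       pvAlt_eq content _ "ouroboros-implement.agent.md" h1 (by decide), if_pos (by decide)]
    exact pvOut_eq content _ _ (by decide)
  · rw [pvLoopA_skip content t _ _ (by decide) h1]
    by_cases h2 : pvToken t = "/ouroboros-archive".toList
    · rw [pvLoopA_hit content t _ _ "ouroboros-archive.agent.md" (by decide) h2 (by decide) (by decide),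
         pvAlt_eq content _ "ouroboros-archive.agent.md" h2 (by decide), if_pos (by decide)]
      exact pvOut_eq content _ _ (by decide)
    · rw [pvLoopA_skip content t _ _ (by decide) h2]
      by_cases h3 : pvToken t = "/ouroboros-init".toList
      · rw [pvLoopA_hit content t _ _ "ouroboros-init.agent.md" (by decide) h3 (by decide) (by decide),
           pvAlt_eq content _ "ouroboros-init.agent.md" h3 (by decide), if_pos (by decide)]
        exact pvOut_eq content _ _ (by decide)
      · rw [pvLoopA_skip content t _ _ (by decide) h3]
        by_cases h4 : pvToken t = "/ouroboros-spec".toList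
        · rw [pvLoopA_hit content t _ _ "ouroboros-spec.agent.md" (by decide) h4 (by decide) (by decide),
             pvAlt_eq content _ "ouroboros-spec.agent.md" h4 (by decide), if_pos (by decide)]
          exact pvOut_eq content _ _ (by decide)
        · rw [pvLoopA_skip content t _ _ (by decide) h4]
          by_cases h5 : pvToken t = "/ouroboros".toList
          · rw [pvLoopA_hit content t _ _ "ouroboros.agent.md" (by decide) h5 (by decide) (by decide),
               pvAlt_eq content _ "ouroboros.agent.md" h5 (by decide), if_pos (by decide)]
            exact pvOut_eq content _ _ (by decide)
          · rw [pvLoopA_skip content t _ _ (by decide) h5]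
            have hnone : SLASH_COMMANDS.get? (pvToken t) = none := by
              have hmk : SLASH_COMMANDS = PySem.Dict.mk
                  [("/ouroboros".toList,           PySem.Dict.ofList [("desc", "Main Orchestrator"), ("file", "ouroboros.agent.md")]),
                   ("/ouroboros-init".toList,      PySem.Dict.ofList [("desc", "Project Init"), ("file", "ouroboros-init.agent.md")]),
                   ("/ouroboros-spec".toList,      PySem.Dict.ofList [("desc", "Spec Workflow"), ("file", "ouroboros-spec.agent.md")]),
                   ("/ouroboros-implement".toList, PySem.Dict.ofList [("desc", "Implementation"), ("file", "ouroboros-implement.agent.md")]),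
                   ("/ouroboros-archive".toList,   PySem.Dict.ofList [("desc", "Archive Specs"), ("file", "ouroboros-archive.agent.md")])] := by decide
              rw [hmk]
              simp only [PySem.Dict.get?_mk_cons]
              rw [if_neg (by simpa using Ne.symm h5), if_neg (by simpa using Ne.symm h3),
                  if_neg (by simpa using Ne.symm h4), if_neg (by simpa using Ne.symm h1),
                  if_neg (by simpa using Ne.symm h2)]
              rfl
            rw [pvAlt_eq content (pvToken t) "" rfl (by rw [hnone]; rfl), if_neg (by simp)]
            simp [pvLoopA]
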